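-- pv_equiv track=rewrite | github.com/ejmockler/indra-belief-model | scripts/s11_ship_verdict.py | _flip_table
-- ===== SOURCE A (Python) =====
-- from collections import Counter, defaultdict
--
-- def _flip_table(a_idx, b_idx, common):
--     cells = defaultdict(list)
--     for h in common:
--         a = (a_idx[h].get("actual")
--              if a_idx[h].get("actual") in ("correct", "incorrect")
--              else "abstain")
--         b = (b_idx[h].get("actual")
--              if b_idx[h].get("actual") in ("correct", "incorrect")
--              else "abstain")
--         cells[(a, b)].append(h)
--     return cells
-- ===== SOURCE B (Python) =====
-- from collections import defaultdict
--
--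
-- def _flip_table(a_idx, b_idx, common):
--     def _norm(v):
--         return v if v in ("correct", "incorrect") else "abstain"
--
--     keyed = [((_norm(a_idx[h].get("actual")), _norm(b_idx[h].get("actual"))), h)
--              for h in common]
--     cells = defaultdict(list)
--     for key in dict.fromkeys(k for k, _ in keyed):
--         cells[key] = [h for k, h in keyed if k == key]
--     return cells
-- ===== Notes on version B (the rewrite author's own statement) =====
-- stated objective: alternative
-- what changed: Replaces the single-pass defaultdict bucketing with a two-phase grouping: precompute all (label-pair, hypothesis) keys, deduplicate the keys in first-appearance order with dict.fromkeys, then build each cell's list by a filter over the keyed sequence.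
import Mathlib
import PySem

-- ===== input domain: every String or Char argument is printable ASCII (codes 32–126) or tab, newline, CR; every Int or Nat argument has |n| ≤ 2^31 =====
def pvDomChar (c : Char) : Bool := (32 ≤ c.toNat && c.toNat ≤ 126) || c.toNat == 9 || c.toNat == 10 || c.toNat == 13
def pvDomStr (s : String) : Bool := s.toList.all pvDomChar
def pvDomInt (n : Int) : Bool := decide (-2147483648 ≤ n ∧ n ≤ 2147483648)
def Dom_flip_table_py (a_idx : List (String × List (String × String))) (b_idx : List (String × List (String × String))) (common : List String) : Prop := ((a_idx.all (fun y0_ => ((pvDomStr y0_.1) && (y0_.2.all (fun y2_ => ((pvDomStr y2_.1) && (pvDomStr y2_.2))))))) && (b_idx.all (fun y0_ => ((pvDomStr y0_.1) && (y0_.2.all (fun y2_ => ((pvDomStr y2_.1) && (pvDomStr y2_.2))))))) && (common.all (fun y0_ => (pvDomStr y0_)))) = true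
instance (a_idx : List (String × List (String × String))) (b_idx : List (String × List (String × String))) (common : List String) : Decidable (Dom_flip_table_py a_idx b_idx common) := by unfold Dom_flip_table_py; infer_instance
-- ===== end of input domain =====

-- B groups by a two-phase scheme (dedup the label pairs in first-appearance order, then one
-- filter per distinct pair) instead of A's single-pass defaultdict bucketing; objective:
-- alternative (same result, different grouping algorithm; not claimed faster).

-- ===== PORT A =====
-- a = a_idx[h].get("actual") if a_idx[h].get("actual") in ("correct","incorrect") else "abstain";
-- the row a_idx[h] is totalized with .getD [] (h missing from a_idx is a KeyError, excluded by Pre_).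
def pvRowA (idx : List (String × List (String × String))) (h : String) : List (String × String) :=
  (PySem.Dict.get? (PySem.Dict.ofList idx) h).getD []

def pvLabelA (idx : List (String × List (String × String))) (h : String) : String :=
  let av := PySem.Dict.get? (PySem.Dict.ofList (pvRowA idx h)) "actual"
  if av == some "correct" || av == some "incorrect" then av.getD "abstain" else "abstain"

def flip_table_py (a_idx : List (String × List (String × String))) (b_idx : List (String × List (String × String))) (common : List String) : List (String × String × List String) :=
  let cells : PySem.Dict (String × String) (List String) :=
    common.foldl
      (fun cells h =>
        let a := pvLabelA a_idx h
        let b := pvLabelA b_idx h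
        cells.modify (a, b) [] (fun v => v ++ [h]))
      PySem.Dict.empty
  cells.items.map (fun p => (p.1.1, p.1.2, p.2))

-- ===== PORT B =====
-- def _norm(v): return v if v in ("correct","incorrect") else "abstain"   (v = row.get("actual"))
def pvNormB (v : Option String) : String :=
  if v == some "correct" || v == some "incorrect" then v.getD "abstain" else "abstain"

-- _norm(a_idx[h].get("actual")); the row lookup totalized with .getD [] exactly as in port A.
def pvLabelB (idx : List (String × List (String × String))) (h : String) : String :=
  pvNormB (PySem.Dict.get? (PySem.Dict.ofList ((PySem.Dict.get? (PySem.Dict.ofList idx) h).getD [])) "actual")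

def flip_table_py_alt (a_idx : List (String × List (String × String))) (b_idx : List (String × List (String × String))) (common : List String) : List (String × String × List String) :=
  let keyed : List ((String × String) × String) :=
    common.map (fun h => ((pvLabelB a_idx h, pvLabelB b_idx h), h))
  (PySem.List.dedup (keyed.map Prod.fst)).map
    (fun k => (k.1, k.2, (keyed.filter (fun p => p.1 == k)).map Prod.snd))

-- ===== PRECONDITION & SPEC =====
-- Pre_ excludes exactly the inputs where Python A raises KeyError: some h in common missing
-- from a_idx or b_idx (B raises there too).
def Pre_flip_table_py (a_idx : List (String × List (String × String))) (b_idx : List (String × List (String × String))) (common : List String) : Prop :=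
  ∀ h ∈ common, h ∈ a_idx.map Prod.fst ∧ h ∈ b_idx.map Prod.fst
instance (a_idx : List (String × List (String × String))) (b_idx : List (String × List (String × String))) (common : List String) : Decidable (Pre_flip_table_py a_idx b_idx common) := by unfold Pre_flip_table_py; infer_instance

def pvWitness_flip_table_py : (List (String × List (String × String))) × (List (String × List (String × String))) × List String :=
  ([("h1", [("actual", "correct")]), ("h2", [])],
   [("h1", [("actual", "nope")]), ("h2", [("actual", "incorrect")])],
   ["h1", "h2", "h1"])

def Spec_flip_table_py (a_idx : List (String × List (String × String))) (b_idx : List (String × List (String × String))) (common : List String) (out : List (String × String × List String)) : Prop := out = flip_table_py_alt a_idx b_idx common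
instance (a_idx : List (String × List (String × String))) (b_idx : List (String × List (String × String))) (common : List String) (out : List (String × String × List String)) : Decidable (Spec_flip_table_py a_idx b_idx common out) := by unfold Spec_flip_table_py; infer_instance

-- ===== CLAIM (what is proved, stated in full; the proofs are below) =====
def Claim_equal_flip_table_py : Prop := ∀ (a_idx : List (String × List (String × String))) (b_idx : List (String × List (String × String))) (common : List String), Dom_flip_table_py a_idx b_idx common → Pre_flip_table_py a_idx b_idx common → Spec_flip_table_py a_idx b_idx common (flip_table_py a_idx b_idx common)

-- ===== LEMMAS AND PROOFS =====

-- the two label normalizations are the same function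
theorem pvLabelA_eq_pvLabelB (idx : List (String × List (String × String))) (h : String) :
    pvLabelA idx h = pvLabelB idx h := rfl

-- A's grouping fold, characterized: its items are the distinct keys in first-appearance order,
-- each paired with the filtered occurrences.
theorem pvFold_items (keyed : List ((String × String) × String)) :
    (keyed.foldl (fun (d : PySem.Dict (String × String) (List String)) p =>
        d.modify p.1 [] (fun v => v ++ [p.2])) PySem.Dict.empty).items
      = (PySem.Set.ofList (keyed.map Prod.fst)).map
          (fun k => (k, (keyed.filter (fun p => p.1 == k)).map Prod.snd)) := by
  set d := keyed.foldl (fun (d : PySem.Dict (String × String) (List String)) p =>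
      d.modify p.1 [] (fun v => v ++ [p.2])) PySem.Dict.empty with hd
  have hkeys : d.keys = PySem.Set.ofList (keyed.map Prod.fst) := by
    rw [hd, PySem.Dict.keys_foldl_modify_key]
    simp [PySem.Dict.keys, PySem.Dict.empty, PySem.Set.update_nil_left]
  have hnd : d.keys.Nodup := by rw [hkeys]; exact PySem.Set.nodup_ofList _
  rw [PySem.Dict.items_eq_map_keys d hnd [], hkeys]
  refine List.map_congr_left (fun k hk => ?_)
  rw [hd, PySem.Dict.getD_foldl_modify_append]
  simp [PySem.Dict.getD_empty]

theorem pvFold_items_key (kf : String → String × String) (common : List String) :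
    (common.foldl (fun (d : PySem.Dict (String × String) (List String)) h =>
        d.modify (kf h) [] (fun v => v ++ [h])) PySem.Dict.empty).items
      = (PySem.Set.ofList (common.map kf)).map
          (fun k => (k, ((common.map (fun h => (kf h, h))).filter
              (fun p => p.1 == k)).map Prod.snd)) := by
  have h := pvFold_items (common.map (fun h => (kf h, h)))
  rw [List.foldl_map] at h
  simpa [List.map_map, Function.comp] using h

theorem flip_table_eq (a_idx : List (String × List (String × String))) (b_idx : List (String × List (String × String))) (common : List String) :
    flip_table_py a_idx b_idx common = flip_table_py_alt a_idx b_idx common := by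
  unfold flip_table_py flip_table_py_alt
  simp only [pvLabelA_eq_pvLabelB,
    pvFold_items_key (fun h => (pvLabelB a_idx h, pvLabelB b_idx h)) common,
    PySem.List.dedup_eq_ofList, List.map_map]
  simp [Function.comp_def]

-- ===== VERDICT (by name: the statement is the Claim_ definition above) =====
theorem flip_table_py_spec : Claim_equal_flip_table_py := by
  intro a_idx b_idx common _ _
  unfold Spec_flip_table_py
  exact flip_table_eq a_idx b_idx common
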